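-- pv_equiv track=rewrite | github.com/PaddlePaddle/PaddleOCR | ppocrvenv/lib/python3.7/site-packages/paddlenlp/ops/faster_transformer/sample/bart_decoding_sample.py | postprocess_seq
-- ===== SOURCE A (Python) =====
-- def postprocess_seq(seq, bos_idx, eos_idx, output_bos=False, output_eos=False):
--     """
--     Post-process the decoded sequence.
--     """
--     eos_pos = len(seq) - 1
--     for i, idx in enumerate(seq):
--         if idx == eos_idx:
--             eos_pos = i
--             break
--     seq = [
--         idx for idx in seq[:eos_pos + 1]
--         if (output_bos or idx != bos_idx) and (output_eos or idx != eos_idx)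
--     ]
--     return seq
-- ===== SOURCE B (Python) =====
-- def postprocess_seq(seq, bos_idx, eos_idx, output_bos=False, output_eos=False):
--     """
--     Post-process the decoded sequence (single pass: keep-filter while
--     scanning, stop right after the first eos token).
--     """
--     res = []
--     for idx in seq:
--         if (output_bos or idx != bos_idx) and (output_eos or idx != eos_idx):
--             res.append(idx)
--         if idx == eos_idx:
--             break
--     return res
-- ===== Notes on version B (the rewrite author's own statement) =====
-- stated objective: simpler
-- what changed: Replaces A's two passes (index-hunting enumerate loop for the first eos, then a slice-and-filter comprehension) with one loop that filters while scanning and breaks right after the first eos token.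
import Mathlib
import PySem

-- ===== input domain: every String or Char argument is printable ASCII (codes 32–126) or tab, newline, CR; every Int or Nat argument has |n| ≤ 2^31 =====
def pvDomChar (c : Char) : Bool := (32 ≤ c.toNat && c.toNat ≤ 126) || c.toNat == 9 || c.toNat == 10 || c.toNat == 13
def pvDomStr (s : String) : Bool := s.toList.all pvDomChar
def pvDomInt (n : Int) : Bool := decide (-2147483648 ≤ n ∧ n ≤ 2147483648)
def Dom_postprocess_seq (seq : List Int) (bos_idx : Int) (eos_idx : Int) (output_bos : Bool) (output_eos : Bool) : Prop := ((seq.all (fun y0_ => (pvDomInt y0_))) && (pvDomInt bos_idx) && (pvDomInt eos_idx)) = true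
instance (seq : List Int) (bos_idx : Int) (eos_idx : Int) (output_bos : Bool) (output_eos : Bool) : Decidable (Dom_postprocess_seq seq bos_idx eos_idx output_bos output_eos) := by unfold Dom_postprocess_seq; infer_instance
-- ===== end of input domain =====

-- B is a single pass that filters while scanning and breaks right after the first eos token;
-- A finds the first eos position, slices, then filters. Same return value, proved below.

-- ===== PORT A =====
-- the 'for i, idx in enumerate(seq): if idx == eos_idx: eos_pos = i; break' loop
def pvFindEos (eos_idx : Int) : List Int → Int → Int → Int
  | [], _, dflt => dflt
  | x :: rest, i, dflt => if x = eos_idx then i else pvFindEos eos_idx rest (i + 1) dflt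

def postprocess_seq (seq : List Int) (bos_idx : Int) (eos_idx : Int) (output_bos : Bool) (output_eos : Bool) : List Int :=
  let eos_pos := pvFindEos eos_idx seq 0 ((seq.length : Int) - 1)
  (PySem.List.slice seq none (some (eos_pos + 1))).filter
    (fun idx => (output_bos || idx != bos_idx) && (output_eos || idx != eos_idx))

-- ===== PORT B =====
-- the single 'for idx in seq: … if idx == eos_idx: break' loop, with res accumulated by the recursion
def pvScan (bos_idx eos_idx : Int) (output_bos output_eos : Bool) : List Int → List Int
  | [] => []
  | idx :: rest =>
      (if (output_bos || idx != bos_idx) && (output_eos || idx != eos_idx) then [idx] else []) ++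
      (if idx == eos_idx then [] else pvScan bos_idx eos_idx output_bos output_eos rest)

def postprocess_seq_alt (seq : List Int) (bos_idx : Int) (eos_idx : Int) (output_bos : Bool) (output_eos : Bool) : List Int :=
  pvScan bos_idx eos_idx output_bos output_eos seq

-- ===== PRECONDITION & SPEC =====
def Spec_postprocess_seq (seq : List Int) (bos_idx : Int) (eos_idx : Int) (output_bos : Bool) (output_eos : Bool) (out : List Int) : Prop := out = postprocess_seq_alt seq bos_idx eos_idx output_bos output_eos
instance (seq : List Int) (bos_idx : Int) (eos_idx : Int) (output_bos : Bool) (output_eos : Bool) (out : List Int) : Decidable (Spec_postprocess_seq seq bos_idx eos_idx output_bos output_eos out) := by unfold Spec_postprocess_seq; infer_instance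

-- ===== CLAIM (what is proved, stated in full; the proofs are below) =====
def Claim_equal_postprocess_seq : Prop := ∀ (seq : List Int) (bos_idx : Int) (eos_idx : Int) (output_bos : Bool) (output_eos : Bool), Dom_postprocess_seq seq bos_idx eos_idx output_bos output_eos → Spec_postprocess_seq seq bos_idx eos_idx output_bos output_eos (postprocess_seq seq bos_idx eos_idx output_bos output_eos)

-- ===== LEMMAS AND PROOFS =====

-- proof-side: the prefix of seq up to and including the first eos (or all of seq)
def pvTakeIncl (eos_idx : Int) : List Int → List Int
  | [] => []
  | x :: rest => x :: (if x = eos_idx then [] else pvTakeIncl eos_idx rest)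

theorem pvFindEos_shift (eos_idx : Int) (xs : List Int) (i d : Int) :
    pvFindEos eos_idx xs (i + 1) (d + 1) = pvFindEos eos_idx xs i d + 1 := by
  induction xs generalizing i with
  | nil => simp [pvFindEos]
  | cons x rest ih =>
      simp only [pvFindEos]
      split
      · rfl
      · exact ih (i + 1)

theorem pvFindEos_ge (eos_idx : Int) (xs : List Int) (i d : Int) :
    pvFindEos eos_idx xs i d = d ∨ i ≤ pvFindEos eos_idx xs i d := by
  induction xs generalizing i with
  | nil => simp [pvFindEos]
  | cons x rest ih =>
      simp only [pvFindEos]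
      split
      · right; omega
      · rcases ih (i + 1) with h | h
        · left; exact h
        · right; omega

theorem pvFindEos_nonneg (eos_idx : Int) (xs : List Int) :
    -1 ≤ pvFindEos eos_idx xs 0 ((xs.length : Int) - 1) := by
  rcases pvFindEos_ge eos_idx xs 0 ((xs.length : Int) - 1) with h | h
  · omega
  · omega

theorem take_findEos (eos_idx : Int) (xs : List Int) :
    xs.take ((pvFindEos eos_idx xs 0 ((xs.length : Int) - 1) + 1).toNat) = pvTakeIncl eos_idx xs := by
  induction xs with
  | nil => simp [pvFindEos, pvTakeIncl]
  | cons x rest ih =>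
      by_cases hx : x = eos_idx
      · simp [pvFindEos, pvTakeIncl, hx]
      · have hstep : pvFindEos eos_idx (x :: rest) 0 (((x :: rest).length : Int) - 1)
            = pvFindEos eos_idx rest 0 ((rest.length : Int) - 1) + 1 := by
          have hlen : (((x :: rest).length : Int) - 1) = (rest.length : Int) := by
            simp
          simp only [pvFindEos, if_neg hx, hlen]
          have := pvFindEos_shift eos_idx rest 0 ((rest.length : Int) - 1)
          simpa using this
        have hge := pvFindEos_nonneg eos_idx rest
        have htn : (pvFindEos eos_idx rest 0 ((rest.length : Int) - 1) + 1 + 1).toNat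
            = (pvFindEos eos_idx rest 0 ((rest.length : Int) - 1) + 1).toNat + 1 := by omega
        rw [hstep, htn, List.take_succ_cons, ih]
        simp [pvTakeIncl, hx]

theorem filter_takeIncl (bos_idx eos_idx : Int) (output_bos output_eos : Bool) (xs : List Int) :
    (pvTakeIncl eos_idx xs).filter
      (fun idx => (output_bos || idx != bos_idx) && (output_eos || idx != eos_idx))
    = pvScan bos_idx eos_idx output_bos output_eos xs := by
  induction xs with
  | nil => simp [pvTakeIncl, pvScan]
  | cons x rest ih =>
      by_cases hx : x = eos_idx
      · simp [pvTakeIncl, pvScan, hx, List.filter_cons]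
      · simp only [pvTakeIncl, pvScan, if_neg hx, beq_iff_eq, List.filter_cons, ih]
        split <;> simp [hx]

theorem postprocess_seq_eq (seq : List Int) (bos_idx eos_idx : Int) (output_bos output_eos : Bool) :
    postprocess_seq seq bos_idx eos_idx output_bos output_eos
    = postprocess_seq_alt seq bos_idx eos_idx output_bos output_eos := by
  unfold postprocess_seq postprocess_seq_alt
  have hge := pvFindEos_nonneg eos_idx seq
  show (PySem.List.slice seq none (some (pvFindEos eos_idx seq 0 ((seq.length : Int) - 1) + 1))).filter
      (fun idx => (output_bos || idx != bos_idx) && (output_eos || idx != eos_idx))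
    = pvScan bos_idx eos_idx output_bos output_eos seq
  have hb : (0 : Int) ≤ pvFindEos eos_idx seq 0 ((seq.length : Int) - 1) + 1 := by omega
  rw [PySem.List.slice_to seq hb, take_findEos, filter_takeIncl]

-- ===== VERDICT (by name: the statement is the Claim_ definition above) =====
theorem postprocess_seq_spec : Claim_equal_postprocess_seq := by
  intro seq bos_idx eos_idx output_bos output_eos _
  exact postprocess_seq_eq seq bos_idx eos_idx output_bos output_eos
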